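-- pv_equiv track=rewrite | github.com/TBTB0725/Agentic_Cloud_Benchmark | backends/code/runner.py | compare_statuses
-- ===== SOURCE A (Python) =====
-- def compare_statuses(
--     pre_status: dict[str, str],
--     post_status: dict[str, str],
-- ) -> tuple[list[str], list[str], list[str], list[str]]:
--     """Compute PASS_TO_PASS and FAIL_TO_PASS summaries."""
--
--     all_tests = set(pre_status) | set(post_status)
--     pass_to_pass_success: list[str] = []
--     fail_to_pass_success: list[str] = []
--     pass_to_pass_failure: list[str] = []
--     fail_to_pass_failure: list[str] = []
--
--     for test_name in sorted(all_tests):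
--         before = pre_status.get(test_name, "skip")
--         after = post_status.get(test_name, "skip")
--         if before == "pass":
--             if after == "pass":
--                 pass_to_pass_success.append(test_name)
--             else:
--                 pass_to_pass_failure.append(test_name)
--         elif before == "fail":
--             if after == "pass":
--                 fail_to_pass_success.append(test_name)
--             else:
--                 fail_to_pass_failure.append(test_name)
--     return (
--         pass_to_pass_success,
--         fail_to_pass_success,
--         pass_to_pass_failure,
--         fail_to_pass_failure,
--     )
-- ===== SOURCE B (Python) =====
-- def compare_statuses(
--     pre_status: dict[str, str],
--     post_status: dict[str, str],
-- ) -> tuple[list[str], list[str], list[str], list[str]]: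
--     """Compute PASS_TO_PASS and FAIL_TO_PASS summaries (four filtered passes)."""
--     tests = sorted(set(pre_status) | set(post_status))
--     return (
--         [t for t in tests if pre_status.get(t, "skip") == "pass" and post_status.get(t, "skip") == "pass"],
--         [t for t in tests if pre_status.get(t, "skip") == "fail" and post_status.get(t, "skip") == "pass"],
--         [t for t in tests if pre_status.get(t, "skip") == "pass" and post_status.get(t, "skip") != "pass"],
--         [t for t in tests if pre_status.get(t, "skip") == "fail" and post_status.get(t, "skip") != "pass"],
--     )
-- ===== Notes on version B (the rewrite author's own statement) =====
-- stated objective: simpler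
-- what changed: Replaces the single classify-and-dispatch loop over four mutable accumulators with four independent filter comprehensions over the sorted test-name list, one per result bucket.
import Mathlib
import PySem

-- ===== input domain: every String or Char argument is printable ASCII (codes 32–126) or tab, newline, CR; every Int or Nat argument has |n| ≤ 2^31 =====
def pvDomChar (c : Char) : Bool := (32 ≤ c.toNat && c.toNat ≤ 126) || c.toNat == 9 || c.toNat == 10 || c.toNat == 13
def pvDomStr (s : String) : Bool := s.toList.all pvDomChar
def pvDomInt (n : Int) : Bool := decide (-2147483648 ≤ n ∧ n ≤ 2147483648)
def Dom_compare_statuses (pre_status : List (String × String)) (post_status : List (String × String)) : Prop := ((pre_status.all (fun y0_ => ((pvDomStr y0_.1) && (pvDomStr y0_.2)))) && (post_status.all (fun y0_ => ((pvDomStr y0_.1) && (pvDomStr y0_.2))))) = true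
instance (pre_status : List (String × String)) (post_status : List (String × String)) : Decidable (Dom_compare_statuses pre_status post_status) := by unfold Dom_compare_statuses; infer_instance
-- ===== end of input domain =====

-- B replaces A's single classify-and-dispatch loop with four independent filters over the sorted test list (objective: simpler).


-- ===== PORT A =====
-- d.get(t, "skip") for the association-list dict
def pvGetSk (d : List (String × String)) (t : String) : String :=
  PySem.Dict.getD (PySem.Dict.mk d) t "skip"

def compare_statuses (pre_status : List (String × String)) (post_status : List (String × String)) : List String × List String × List String × List String :=
  let all_tests := PySem.Set.union (PySem.Set.ofList (pre_status.map Prod.fst)) (post_status.map Prod.fst)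
  let r := (PySem.List.sorted all_tests (fun x => x) false).foldl
    (fun acc test_name =>
      let before := pvGetSk pre_status test_name
      let after := pvGetSk post_status test_name
      if before = "pass" then
        if after = "pass" then (acc.1 ++ [test_name], acc.2.1, acc.2.2.1, acc.2.2.2)
        else (acc.1, acc.2.1, acc.2.2.1 ++ [test_name], acc.2.2.2)
      else if before = "fail" then
        if after = "pass" then (acc.1, acc.2.1 ++ [test_name], acc.2.2.1, acc.2.2.2)
        else (acc.1, acc.2.1, acc.2.2.1, acc.2.2.2 ++ [test_name])
      else acc)
    (([] : List String), ([] : List String), ([] : List String), ([] : List String))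
  r

-- ===== PORT B =====
def compare_statuses_alt (pre_status : List (String × String)) (post_status : List (String × String)) : List String × List String × List String × List String :=
  let tests := PySem.List.sorted (PySem.Set.union (PySem.Set.ofList (pre_status.map Prod.fst)) (post_status.map Prod.fst)) (fun x => x) false
  (tests.filter (fun t => pvGetSk pre_status t == "pass" && pvGetSk post_status t == "pass"),
   tests.filter (fun t => pvGetSk pre_status t == "fail" && pvGetSk post_status t == "pass"),
   tests.filter (fun t => pvGetSk pre_status t == "pass" && pvGetSk post_status t != "pass"),
   tests.filter (fun t => pvGetSk pre_status t == "fail" && pvGetSk post_status t != "pass"))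

-- ===== PRECONDITION & SPEC =====
def Spec_compare_statuses (pre_status : List (String × String)) (post_status : List (String × String)) (out : List String × List String × List String × List String) : Prop := out = compare_statuses_alt pre_status post_status
instance (pre_status : List (String × String)) (post_status : List (String × String)) (out : List String × List String × List String × List String) : Decidable (Spec_compare_statuses pre_status post_status out) := by unfold Spec_compare_statuses; infer_instance

-- ===== CLAIM (what is proved, stated in full; the proofs are below) =====
def Claim_equal_compare_statuses : Prop := ∀ (pre_status : List (String × String)) (post_status : List (String × String)), Dom_compare_statuses pre_status post_status → Spec_compare_statuses pre_status post_status (compare_statuses pre_status post_status)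

-- ===== LEMMAS AND PROOFS =====
-- Invariant of A's fold: starting from (a,b,c,d), each bucket grows by the corresponding filter.
theorem pv_fold_inv (pre post : List (String × String)) (l : List String)
    (a b c d : List String) :
    l.foldl
      (fun acc test_name =>
        let before := pvGetSk pre test_name
        let after := pvGetSk post test_name
        if before = "pass" then
          if after = "pass" then (acc.1 ++ [test_name], acc.2.1, acc.2.2.1, acc.2.2.2)
          else (acc.1, acc.2.1, acc.2.2.1 ++ [test_name], acc.2.2.2)
        else if before = "fail" then
          if after = "pass" then (acc.1, acc.2.1 ++ [test_name], acc.2.2.1, acc.2.2.2)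
          else (acc.1, acc.2.1, acc.2.2.1, acc.2.2.2 ++ [test_name])
        else acc)
      (a, b, c, d)
    = (a ++ l.filter (fun t => pvGetSk pre t == "pass" && pvGetSk post t == "pass"),
       b ++ l.filter (fun t => pvGetSk pre t == "fail" && pvGetSk post t == "pass"),
       c ++ l.filter (fun t => pvGetSk pre t == "pass" && pvGetSk post t != "pass"),
       d ++ l.filter (fun t => pvGetSk pre t == "fail" && pvGetSk post t != "pass")) := by
  induction l generalizing a b c d with
  | nil => simp
  | cons x xs ih =>
    simp only [List.foldl_cons, List.filter_cons]
    by_cases h1 : pvGetSk pre x = "pass" <;> by_cases h2 : pvGetSk post x = "pass" <;>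
      by_cases h3 : pvGetSk pre x = "fail" <;>
      simp [h1, h2, h3, ih, List.append_assoc]

-- ===== VERDICT (by name: the statement is the Claim_ definition above) =====
theorem compare_statuses_spec : Claim_equal_compare_statuses := by
  intro pre post _
  show _ = _
  unfold compare_statuses compare_statuses_alt
  simp only [pv_fold_inv, List.nil_append]
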